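-- pv_equiv track=rewrite | github.com/SampadaPatil19/sampada_patil_FBS_work | assignments/12-assignment/question_9.py | countCharAndWords
-- ===== SOURCE A (Python) =====
-- def countCharAndWords(str):
--     count = 0
--     words = 1
--     for ch in str:
--         count += 1
--         if ch == ' ':
--             words += 1
--
--     return f'Count of Words is {words} and count of char is {count}.'
-- ===== SOURCE B (Python) =====
-- def countCharAndWords(str):
--     pieces = str.split(' ')
--     words = len(pieces)
--     count = sum(len(p) for p in pieces) + words - 1
--     return f'Count of Words is {words} and count of char is {count}.'
-- ===== Notes on version B (the rewrite author's own statement) =====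
-- stated objective: alternative
-- what changed: Instead of A's single character loop with two accumulators, B splits the string on the space separator and derives both answers from the piece list: the word count is the number of pieces and the character count is the sum of the piece lengths plus the number of separators.
import Mathlib
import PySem

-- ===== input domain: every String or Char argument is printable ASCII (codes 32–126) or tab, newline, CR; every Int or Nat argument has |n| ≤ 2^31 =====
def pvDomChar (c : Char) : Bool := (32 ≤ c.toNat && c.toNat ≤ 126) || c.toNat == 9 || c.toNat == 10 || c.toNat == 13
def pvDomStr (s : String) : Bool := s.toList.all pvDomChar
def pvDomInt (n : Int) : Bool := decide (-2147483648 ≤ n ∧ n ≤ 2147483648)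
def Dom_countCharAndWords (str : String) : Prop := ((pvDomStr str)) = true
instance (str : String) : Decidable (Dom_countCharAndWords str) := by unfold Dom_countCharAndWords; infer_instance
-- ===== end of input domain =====

-- B replaces A's two-accumulator character loop by splitting on ' ' and deriving both counts
-- from the resulting piece list; objective: alternative decomposition.

-- ===== PORT A =====
def countCharAndWords (str : String) : String :=
  let st : Int × Int := str.toList.foldl
    (fun (p : Int × Int) ch => (p.1 + 1, if ch == ' ' then p.2 + 1 else p.2)) (0, 1)
  "Count of Words is " ++ PySem.Int.toStr st.2 ++ " and count of char is " ++ PySem.Int.toStr st.1 ++ "."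

-- ===== PORT B =====
-- str.split(' ') with a nonempty separator is PySem.Chars.splitOn on the code points (exact).
def countCharAndWords_alt (str : String) : String :=
  let pieces : List (List Char) := PySem.Chars.splitOn str.toList [' ']
  let words : Int := pieces.length
  let count : Int := ((pieces.map List.length).sum : Int) + words - 1
  "Count of Words is " ++ PySem.Int.toStr words ++ " and count of char is " ++ PySem.Int.toStr count ++ "."

-- ===== PRECONDITION & SPEC =====
def Spec_countCharAndWords (str : String) (out : String) : Prop := out = countCharAndWords_alt str
instance (str : String) (out : String) : Decidable (Spec_countCharAndWords str out) := by unfold Spec_countCharAndWords; infer_instance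

-- ===== CLAIM =====
def Claim_equal_countCharAndWords : Prop := ∀ (str : String), Dom_countCharAndWords str → Spec_countCharAndWords str (countCharAndWords str)

-- ===== LEMMAS AND PROOFS =====

-- A's loop state equals (length, 1 + number of spaces).
theorem pv_loop_eq (l : List Char) :
    l.foldl (fun (p : Int × Int) ch => (p.1 + 1, if ch == ' ' then p.2 + 1 else p.2)) (0, 1)
      = ((l.length : Int), 1 + (l.count ' ' : Int)) := by
  rw [PySem.List.foldl_prod_mk (f := fun (a : Int) (_ : Char) => a + 1)
      (g := fun (a : Int) (ch : Char) => if ch == ' ' then a + 1 else a)]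
  rw [PySem.List.foldl_beq_add_one]
  rw [PySem.List.foldl_add (g := fun (_ : Char) => (1 : Int))]
  simp

-- splitOn's worker on the single-char separator ' ': number of pieces and total piece length.
theorem pv_go_facts (l : List Char) : ∀ (fuel : ℕ) (cur : List Char) (acc : List (List Char)),
    l.length ≤ fuel →
    (PySem.Chars.splitOn.go [' '] fuel l cur acc).length = acc.length + 1 + l.count ' ' ∧
    ((PySem.Chars.splitOn.go [' '] fuel l cur acc).map List.length).sum + l.count ' '
      = (acc.map List.length).sum + cur.length + l.length := by
  induction l with
  | nil =>
    intro fuel cur acc h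
    cases fuel <;> simp [PySem.Chars.splitOn.go]
  | cons c rest ih =>
    intro fuel cur acc h
    cases fuel with
    | zero => simp at h
    | succ f =>
      rw [PySem.Chars.splitOn.go]
      by_cases hc : c = ' '
      · subst hc
        simp only [List.isPrefixOf, beq_self_eq_true, Bool.true_and, if_true]
        have := ih f [] (cur.reverse :: acc) (by simpa using h)
        constructor
        · rw [show (List.drop [' '].length (' ' :: rest)) = rest by simp]
          simp only [this.1]
          simp only [List.count_cons, List.length_cons]
          simp
          omega
        · rw [show (List.drop [' '].length (' ' :: rest)) = rest by simp]
          have h2 := this.2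
          simp only [List.map_cons, List.sum_cons, List.length_reverse, List.length_nil] at h2
          simp only [List.count_cons, List.length_cons]
          simp
          omega
      · have hp : ([' '].isPrefixOf (c :: rest)) = false := by
          simp [List.isPrefixOf, Ne.symm hc]
        simp only [hp]
        rw [if_neg (by simp)]
        have := ih f (c :: cur) acc (by simpa using h)
        refine ⟨by simp only [this.1]; simp [hc], ?_⟩
        have h2 := this.2
        simp only [List.length_cons] at h2
        simp only [List.count_cons, List.length_cons]
        simp [hc]
        omega

theorem pv_splitOn_len (s : List Char) :
    (PySem.Chars.splitOn s [' ']).length = 1 + s.count ' ' := by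
  have := (pv_go_facts s (s.length + 1) [] [] (by omega)).1
  simpa [PySem.Chars.splitOn] using this

theorem pv_splitOn_sum (s : List Char) :
    ((PySem.Chars.splitOn s [' ']).map List.length).sum + s.count ' ' = s.length := by
  have := (pv_go_facts s (s.length + 1) [] [] (by omega)).2
  simpa [PySem.Chars.splitOn] using this

-- ===== VERDICT =====
theorem countCharAndWords_spec : Claim_equal_countCharAndWords := by
  intro s _
  unfold Spec_countCharAndWords countCharAndWords countCharAndWords_alt
  simp only [pv_loop_eq, pv_splitOn_len]
  have hsum := pv_splitOn_sum s.toList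
  have hcast : (((PySem.Chars.splitOn s.toList [' ']).map List.length).sum : Int)
      = (s.toList.length : Int) - (s.toList.count ' ' : Int) := by
    omega
  rw [hcast]
  norm_num
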